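-- pv_equiv track=rewrite | github.com/cipher-wb/NovelCraft-Pro | backend/app/services/repair_service.py | _normalize_text_block
-- ===== SOURCE A (Python) =====
-- def _normalize_text_block(text: str) -> str:
--     lines = [line.rstrip() for line in text.replace("\r\n", "\n").split("\n")]
--     normalized: list[str] = []
--     previous_blank = False
--     for line in lines:
--         if line.strip():
--             normalized.append(line)
--             previous_blank = False
--         elif not previous_blank:
--             normalized.append("")
--             previous_blank = True
--     return "\n".join(normalized).strip()
-- ===== SOURCE B (Python) =====
-- def _normalize_text_block(text: str) -> str:
--     # Stateless pairwise filter: a line survives iff it, or the line just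
--     # before it, is non-blank (lines are rstripped, so blank == falsy);
--     # the final .strip() disposes of any leading blank run this keeps or drops.
--     lines = [line.rstrip() for line in text.replace("\r\n", "\n").split("\n")]
--     kept = [cur for prev, cur in zip([""] + lines, lines) if cur or prev]
--     return "\n".join(kept).strip()
-- ===== Notes on version B (the rewrite author's own statement) =====
-- stated objective: simpler
-- what changed: Replaces the previous_blank state machine with a stateless pairwise filter: zip the rstripped lines with a shifted copy and keep a line iff it or its predecessor is non-blank, relying on the final strip() to remove the leading blank run.
import Mathlib
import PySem

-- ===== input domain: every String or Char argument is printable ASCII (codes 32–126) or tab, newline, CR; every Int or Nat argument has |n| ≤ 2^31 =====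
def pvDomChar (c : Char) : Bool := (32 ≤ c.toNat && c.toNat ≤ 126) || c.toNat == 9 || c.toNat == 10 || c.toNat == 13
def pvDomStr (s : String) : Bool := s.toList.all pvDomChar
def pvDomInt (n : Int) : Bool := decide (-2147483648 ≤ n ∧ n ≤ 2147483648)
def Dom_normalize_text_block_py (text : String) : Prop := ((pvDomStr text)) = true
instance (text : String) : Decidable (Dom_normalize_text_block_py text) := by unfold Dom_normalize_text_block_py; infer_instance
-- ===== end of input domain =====

-- B replaces A's previous_blank state machine by a stateless pairwise filter over
-- zipped adjacent lines (keep a line iff it or its predecessor is non-blank);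
-- same O(n) cost, shorter and stateless.


-- ===== PORT A =====
-- lines = [line.rstrip() for line in text.replace("\r\n","\n").split("\n")];
-- then the previous_blank state machine; finally "\n".join(...).strip().
def normalize_text_block_py (text : String) : String :=
  let lines := ((PySem.Str.split? (PySem.Str.replace text "\r\n" "\n") "\n").getD []).map
      PySem.Str.rstrip
  let st := lines.foldl
    (fun (st : List String × Bool) line =>
      if PySem.Str.strip line ≠ "" then (st.1 ++ [line], false)
      else if st.2 = false then (st.1 ++ [""], true)
      else st)
    ([], false)
  PySem.Str.strip (PySem.Str.join "\n" st.1)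

-- ===== PORT B =====
-- kept = [cur for prev, cur in zip([""] + lines, lines) if cur or prev]
def normalize_text_block_py_alt (text : String) : String :=
  let lines := ((PySem.Str.split? (PySem.Str.replace text "\r\n" "\n") "\n").getD []).map
      PySem.Str.rstrip
  let kept := ((("" :: lines).zip lines).filter
      (fun pc => pc.2 != "" || pc.1 != "")).map Prod.snd
  PySem.Str.strip (PySem.Str.join "\n" kept)

-- ===== PRECONDITION & SPEC =====
def Spec_normalize_text_block_py (text : String) (out : String) : Prop := out = normalize_text_block_py_alt text
instance (text : String) (out : String) : Decidable (Spec_normalize_text_block_py text out) := by unfold Spec_normalize_text_block_py; infer_instance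

-- ===== CLAIM (what is proved, stated in full; the proofs are below) =====
def Claim_equal_normalize_text_block_py : Prop := ∀ (text : String), Dom_normalize_text_block_py text → Spec_normalize_text_block_py text (normalize_text_block_py text)

-- ===== LEMMAS AND PROOFS =====

-- proof-only spec-level recursion for B's pairwise filter: prev carried explicitly
def keepF (p : String) : List String → List String
  | [] => []
  | c :: t => if c ≠ "" ∨ p ≠ "" then c :: keepF c t else keepF c t

theorem zip_filter_eq_keepF (l : List String) (p : String) :
    (((p :: l).zip l).filter (fun pc => pc.2 != "" || pc.1 != "")).map Prod.snd = keepF p l := by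
  induction l generalizing p with
  | nil => simp [keepF]
  | cons c t ih =>
    have hz : (p :: c :: t).zip (c :: t) = (p, c) :: (c :: t).zip t := rfl
    rw [hz, List.filter_cons, keepF]
    by_cases hc : c ≠ "" ∨ p ≠ ""
    · rw [if_pos (show (((p, c).2 != "") || ((p, c).1 != "")) = true by
        simp only [Bool.or_eq_true, bne_iff_ne]; exact hc), if_pos hc, List.map_cons, ih]
    · push Not at hc
      rw [if_neg (show ¬ (((p, c).2 != "") || ((p, c).1 != "")) = true by
        simp [hc.1, hc.2]), if_neg (by simp [hc.1, hc.2]), ih]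

-- A's loop body as a named recursion (foldl characterization)
def goA : Bool → List String → List String
  | _, [] => []
  | prev, h :: t =>
    if PySem.Str.strip h ≠ "" then h :: goA false t
    else if prev = false then "" :: goA true t
    else goA true t

theorem foldA_eq (lines : List String) (acc : List String) (prev : Bool) :
    (lines.foldl
      (fun (st : List String × Bool) line =>
        if PySem.Str.strip line ≠ "" then (st.1 ++ [line], false)
        else if st.2 = false then (st.1 ++ [""], true)
        else st)
      (acc, prev)).1 = acc ++ goA prev lines := by
  induction lines generalizing acc prev with
  | nil => simp [goA]
  | cons h t ih =>
    simp only [List.foldl, goA]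
    split
    · rw [ih]; simp
    · split
      · rw [ih]; simp
      · rename_i hp
        have hp' : prev = true := by simpa using hp
        subst hp'
        rw [ih]

-- character-level fact: a line that is already rstripped is blank iff it strips to ""
theorem dropWhile_all_eq_nil {p : Char → Bool} (l : List Char)
    (h : ∀ c ∈ List.dropWhile p l, p c = true) : List.dropWhile p l = [] := by
  induction l with
  | nil => rfl
  | cons a t ih =>
    cases hp : p a with
    | true =>
      simp only [List.dropWhile_cons, hp, if_true] at h ⊢
      exact ih h
    | false =>
      simp only [List.dropWhile_cons, hp] at h
      exact absurd (h a (by simp)) (by simp [hp])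

theorem rstrip_eq_nil_iff (cs : List Char) :
    PySem.Chars.rstrip cs = [] ↔ ∀ c ∈ cs, PySem.Chars.isspace c = true := by
  simp [PySem.Chars.rstrip, List.dropWhile_eq_nil_iff]

theorem rstrip_all_isspace (cs : List Char)
    (h : ∀ c ∈ PySem.Chars.rstrip cs, PySem.Chars.isspace c = true) :
    PySem.Chars.rstrip cs = [] := by
  simp only [PySem.Chars.rstrip] at h ⊢
  rw [dropWhile_all_eq_nil (cs.reverse) (fun c hc => h c (by simpa using hc))]
  rfl

theorem strip_rstrip_chars (cs : List Char)
    (h : PySem.Chars.strip (PySem.Chars.rstrip cs) = []) : PySem.Chars.rstrip cs = [] := by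
  have h1 : ∀ c ∈ PySem.Chars.lstrip (PySem.Chars.rstrip cs), PySem.Chars.isspace c = true :=
    (rstrip_eq_nil_iff _).1 h
  have h2 : PySem.Chars.lstrip (PySem.Chars.rstrip cs) = [] := by
    simpa [PySem.Chars.lstrip] using
      dropWhile_all_eq_nil (PySem.Chars.rstrip cs) (by simpa [PySem.Chars.lstrip] using h1)
  have h3 : ∀ c ∈ PySem.Chars.rstrip cs, PySem.Chars.isspace c = true := by
    simpa [PySem.Chars.lstrip, List.dropWhile_eq_nil_iff] using h2
  exact rstrip_all_isspace cs h3

theorem strip_rstrip (s : String)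
    (h : PySem.Str.strip (PySem.Str.rstrip s) = "") : PySem.Str.rstrip s = "" := by
  simp only [PySem.Str.strip, PySem.Str.rstrip, String.toList_ofList,
    String.ofList_eq_empty_iff] at h ⊢
  exact strip_rstrip_chars s.toList h

-- A's recursion equals keepF: goA false = keepF (any non-blank prev), goA true = keepF ""
theorem goA_eq_keepF (lines : List String)
    (h : ∀ l ∈ lines, PySem.Str.strip l = "" → l = "") :
    (∀ p, p ≠ "" → goA false lines = keepF p lines) ∧ goA true lines = keepF "" lines := by
  induction lines with
  | nil => simp [goA, keepF]
  | cons a t ih =>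
    have ht := ih (fun l hl => h l (List.mem_cons_of_mem a hl))
    by_cases hs : PySem.Str.strip a = ""
    · have ha : a = "" := h a (List.mem_cons_self ..) hs
      subst ha
      constructor
      · intro p hp
        rw [goA, if_neg (by simpa using hs), if_pos rfl, keepF, if_pos (Or.inr hp), ht.2]
      · rw [goA, if_neg (by simpa using hs), if_neg (by simp), keepF,
          if_neg (by simp), ht.2]
    · have ha : a ≠ "" := fun he => hs (by rw [he]; decide)
      constructor
      · intro p hp
        rw [goA, if_pos hs, keepF, if_pos (Or.inl ha), ht.1 a ha]
      · rw [goA, if_pos hs, keepF, if_pos (Or.inl ha), ht.1 a ha]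

-- joining after dropping vs keeping one leading "" gives the same stripped string
theorem strip_join_blank_cons (xs : List String) :
    PySem.Str.strip (PySem.Str.join "\n" ("" :: xs)) = PySem.Str.strip (PySem.Str.join "\n" xs) := by
  cases xs with
  | nil => rfl
  | cons y ys =>
    simp only [PySem.Str.strip, PySem.Str.join]
    congr 1
    have hj : PySem.Chars.join ('\n' :: ([] : List Char))
        (List.map String.toList ("" :: y :: ys)) =
        '\n' :: PySem.Chars.join ('\n' :: []) (List.map String.toList (y :: ys)) := by
      simp [PySem.Chars.join_cons_cons]
    simp only [String.toList_ofList]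
    show PySem.Chars.strip _ = PySem.Chars.strip _
    have : ("\n" : String).toList = ['\n'] := rfl
    rw [show (("\n" : String).toList) = ['\n'] from rfl] at *
    rw [hj]
    show PySem.Chars.strip ('\n' :: _) = _
    simp [PySem.Chars.strip, PySem.Chars.lstrip, PySem.Chars.isspace]

-- the two kept-line lists give the same stripped join
theorem strip_goA_eq_keepF (lines : List String)
    (hmem : ∀ l ∈ lines, PySem.Str.strip l = "" → l = "") :
    PySem.Str.strip (PySem.Str.join "\n" (goA false lines)) =
    PySem.Str.strip (PySem.Str.join "\n" (keepF "" lines)) := by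
  have hg := goA_eq_keepF lines hmem
  cases lines with
  | nil => rfl
  | cons a t =>
    by_cases ha : a = ""
    · subst ha
      have h1 : goA false ("" :: t) = "" :: keepF "" ("" :: t) := by
        rw [hg.1 "x" (by decide), keepF, if_pos (Or.inr (by decide)), keepF,
          if_neg (by simp)]
      rw [h1, strip_join_blank_cons]
    · rw [hg.1 a ha]
      simp only [keepF]
      rw [if_pos (Or.inl ha), if_pos (Or.inl ha)]

-- ===== VERDICT (by name: the statement is the Claim_ definition above) =====
theorem normalize_text_block_py_spec : Claim_equal_normalize_text_block_py := by
  intro text _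
  unfold Spec_normalize_text_block_py normalize_text_block_py normalize_text_block_py_alt
  simp only []
  set lines := ((PySem.Str.split? (PySem.Str.replace text "\r\n" "\n") "\n").getD []).map
      PySem.Str.rstrip with hlines
  have hmem : ∀ l ∈ lines, PySem.Str.strip l = "" → l = "" := by
    intro l hl
    rw [hlines] at hl
    obtain ⟨s, _, rfl⟩ := List.mem_map.1 hl
    exact strip_rstrip s
  rw [foldA_eq lines [] false, zip_filter_eq_keepF lines "", List.nil_append]
  exact strip_goA_eq_keepF lines hmem
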